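-- pv_equiv track=rewrite | github.com/ahn-gihyeok/DNA_Translator | optimizer.py | aa_to_list
-- ===== SOURCE A (Python) =====
-- three_to_one = {
--     'ALA': 'A',  # Alanine
--     'ARG': 'R',  # Arginine
--     'ASN': 'N',  # Asparagine
--     'ASP': 'D',  # Asparatate
--     'CYS': 'C',  # Cysteine
--     'GLN': 'Q',  # Glutamine
--     'GLU': 'E',  # Glutamate
--     'GLY': 'G',  # Glycine
--     'HIS': 'H',  # Histidine
--     'ILE': 'I',  # Isoleucine
--     'LEU': 'L',  # Leucine
--     'LYS': 'K',  # Lysine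
--     'MET': 'M',  # Methionine
--     'PHE': 'F',  # Phenylalanine
--     'PRO': 'P',  # Proline
--     'SER': 'S',  # Serine
--     'THR': 'T',  # Threonine
--     'TRP': 'W',  # Tryptophan
--     'TYR': 'Y',  # Tyrosine
--     'VAL': 'V'   # Valine
-- }
--
-- set_one=set(three_to_one.values())
--
-- def aa_to_list(aa_seq):
--     if not isinstance(aa_seq,str):
--         raise TypeError('입력은 문자열이여야 합니다.')
--
--     AA_SEQ=aa_seq.strip().upper()
--
--     if ' ' in AA_SEQ or ',' in AA_SEQ:
--         raise ValueError('표준 형식에 맞지 않습니다.(중간 공백/쉼표 감지)')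
--
--     if '-' in AA_SEQ:
--
--         AA_SEQ3=AA_SEQ.split('-')
--         AA_SEQ3_1=[]
--
--         for AA3 in AA_SEQ3:
--             if AA3 in three_to_one:
--                 AA_SEQ3_1.append(three_to_one[AA3])
--             else:
--                 raise ValueError(f"표준 형식에 맞지 않습니다. 또는 옳바르지 않은 아미노산 '{AA3}'가 입력되었습니다.")
--         return AA_SEQ3_1
--
--     if '-' not in AA_SEQ:
--         AA_SEQ1=list(AA_SEQ)
--
--         for AA1 in AA_SEQ1:
--             if AA1 in set_one:
--                 pass
--             else:
--                 raise ValueError(f"표준 형식에 맞지 않습니다. 또는 옳바르지 않은 아미노산 '{AA1}'가 입력되었습니다.")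
--
--         return AA_SEQ1
-- ===== SOURCE B (Python) =====
-- three_to_one = {
--     'ALA': 'A', 'ARG': 'R', 'ASN': 'N', 'ASP': 'D', 'CYS': 'C',
--     'GLN': 'Q', 'GLU': 'E', 'GLY': 'G', 'HIS': 'H', 'ILE': 'I',
--     'LEU': 'L', 'LYS': 'K', 'MET': 'M', 'PHE': 'F', 'PRO': 'P',
--     'SER': 'S', 'THR': 'T', 'TRP': 'W', 'TYR': 'Y', 'VAL': 'V'
-- }
--
-- set_one = set(three_to_one.values())
--
-- def aa_to_list(aa_seq):
--     if not isinstance(aa_seq, str):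
--         raise TypeError('입력은 문자열이여야 합니다.')
--
--     AA_SEQ = aa_seq.strip().upper()
--
--     if ' ' in AA_SEQ or ',' in AA_SEQ:
--         raise ValueError('표준 형식에 맞지 않습니다.(중간 공백/쉼표 감지)')
--
--     if '-' in AA_SEQ:
--         # stream the string: never build a token list, consume it with partition
--         out = []
--         rest = AA_SEQ
--         while True:
--             head, dash, rest = rest.partition('-')
--             if head not in three_to_one:
--                 raise ValueError(f"표준 형식에 맞지 않습니다. 또는 옳바르지 않은 아미노산 '{head}'가 입력되었습니다.")
--             out.append(three_to_one[head])
--             if not dash: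
--                 return out
--
--     # letter form: staged — collect the offenders first, then return the characters
--     bad = [ch for ch in AA_SEQ if ch not in set_one]
--     if bad:
--         raise ValueError(f"표준 형식에 맞지 않습니다. 또는 옳바르지 않은 아미노산 '{bad[0]}'가 입력되었습니다.")
--     return list(AA_SEQ)
-- ===== Notes on version B (the rewrite author's own statement) =====
-- stated objective: alternative
-- what changed: A splits the string into a token list and runs branch-local validation loops (dict lookup / set membership); B never builds a token list: the dash form is consumed as a stream with partition('-') in a while loop, and the letter form is validated by a staged filter-the-offenders pass before returning list(AA_SEQ).
import Mathlib
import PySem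

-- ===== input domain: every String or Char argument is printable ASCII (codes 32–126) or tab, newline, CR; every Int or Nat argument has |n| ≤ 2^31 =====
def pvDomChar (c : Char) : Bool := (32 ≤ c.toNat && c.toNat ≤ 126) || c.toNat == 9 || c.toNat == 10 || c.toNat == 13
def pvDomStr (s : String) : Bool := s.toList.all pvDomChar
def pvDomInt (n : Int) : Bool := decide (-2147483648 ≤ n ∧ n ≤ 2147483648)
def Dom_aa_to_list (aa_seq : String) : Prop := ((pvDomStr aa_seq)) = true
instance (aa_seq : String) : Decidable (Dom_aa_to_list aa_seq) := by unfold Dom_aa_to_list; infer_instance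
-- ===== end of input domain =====

-- B replaces A's split-into-a-token-list + per-token loop by a partition('-')-driven
-- stream consumption of the string (no token list is ever built) and replaces A's
-- letter-validation loop by a staged filter-the-offenders pass; objective: alternative.
-- Equivalence is about the RETURN value; where the Python raises, the ports return [] and Pre_ excludes those inputs.

set_option maxRecDepth 8000
set_option maxHeartbeats 1000000

-- ===== PORT A =====
-- AA_SEQ = aa_seq.strip().upper()  (identical first line of both Pythons)
def aaS (aa_seq : String) : String := PySem.Str.upper (PySem.Str.strip aa_seq)

-- AA_SEQ.split('-')  (A's token list)
def pvToks (S : String) : List String := (PySem.Str.split? S "-").getD []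

def threeToOne : PySem.Dict String String := PySem.Dict.ofList
  [("ALA", "A"), ("ARG", "R"), ("ASN", "N"), ("ASP", "D"), ("CYS", "C"), ("GLN", "Q"), ("GLU", "E"), ("GLY", "G"), ("HIS", "H"), ("ILE", "I"), ("LEU", "L"), ("LYS", "K"), ("MET", "M"), ("PHE", "F"), ("PRO", "P"), ("SER", "S"), ("THR", "T"), ("TRP", "W"), ("TYR", "Y"), ("VAL", "V")]

def setOne : PySem.Set String := PySem.Set.ofList threeToOne.values

-- A's dash-branch loop: append three_to_one[AA3] or raise ([] = ValueError, excluded by Pre_)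
def loopA3 : List String → List String → List String
  | acc, [] => acc
  | acc, t :: ts =>
    if threeToOne.contains t then loopA3 (acc ++ [threeToOne.getD t ""]) ts else []

-- A's letter-branch loop: validate every one-letter string against set_one
def checkA1 : List String → Bool
  | [] => true
  | s :: rest => if PySem.Set.contains setOne s then checkA1 rest else false

def aa_to_list (aa_seq : String) : List String :=
  let S := aaS aa_seq
  if PySem.Str.isIn " " S || PySem.Str.isIn "," S then []   -- ValueError, excluded by Pre_
  else if PySem.Str.isIn "-" S then
    loopA3 [] (pvToks S)
  else
    let cs := S.toList.map (fun c => String.ofList [c])          -- list(AA_SEQ)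
    if checkA1 cs then cs else []                            -- ValueError, excluded by Pre_

-- ===== PORT B =====
-- B's while loop: head, dash, rest = rest.partition('-'); raise/emit; stop when no dash.
-- partition('-') is ported by hand (PySem has no partition): for the single-character
-- separator '-' it is exactly (takeWhile (≠'-'), found?, dropWhile (≠'-') minus the dash).
def convCodes (cs : List Char) : List String :=
  if threeToOne.contains (String.ofList (cs.takeWhile (fun c => c ≠ '-'))) then
    if (cs.dropWhile (fun c => c ≠ '-')).isEmpty then      -- not dash: stop
      [threeToOne.getD (String.ofList (cs.takeWhile (fun c => c ≠ '-'))) ""]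
    else
      threeToOne.getD (String.ofList (cs.takeWhile (fun c => c ≠ '-'))) ""
        :: convCodes (cs.dropWhile (fun c => c ≠ '-')).tail
  else []                                                  -- ValueError, excluded by Pre_
termination_by cs.length
decreasing_by
  have h1 : (cs.dropWhile (fun c => decide (c ≠ '-'))).length ≤ cs.length :=
    List.length_dropWhile_le _ _
  have h2 : 0 < (cs.dropWhile (fun c => decide (c ≠ '-'))).length :=
    List.length_pos_of_ne_nil (by simpa [List.isEmpty_iff] using
      (by assumption : ¬ (cs.dropWhile (fun c => decide (c ≠ '-'))).isEmpty = true))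
  simp only [List.length_tail]
  omega

def aa_to_list_alt (aa_seq : String) : List String :=
  let S := aaS aa_seq
  if PySem.Str.isIn " " S || PySem.Str.isIn "," S then []    -- ValueError, excluded by Pre_
  else if PySem.Str.isIn "-" S then
    convCodes S.toList
  else
    -- bad = [ch for ch in AA_SEQ if ch not in set_one]
    let bad := S.toList.filter (fun c => ¬ PySem.Set.contains setOne (String.ofList [c]))
    if bad.isEmpty then S.toList.map (fun c => String.ofList [c])
    else []                                                  -- ValueError, excluded by Pre_

-- ===== PRECONDITION & SPEC =====
-- Pre_ = exactly the inputs on which Python A returns: the stripped-uppercased string has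
-- no space/comma, and every dash token is a three-letter code (resp. every character a one-letter code).
def Pre_aa_to_list (aa_seq : String) : Prop :=
  PySem.Str.isIn " " (aaS aa_seq) = false ∧ PySem.Str.isIn "," (aaS aa_seq) = false ∧
  (PySem.Str.isIn "-" (aaS aa_seq) = true → ∀ t ∈ pvToks (aaS aa_seq), threeToOne.contains t = true) ∧
  (PySem.Str.isIn "-" (aaS aa_seq) = false → ∀ c ∈ (aaS aa_seq).toList, PySem.Set.contains setOne (String.ofList [c]) = true)
instance (aa_seq : String) : Decidable (Pre_aa_to_list aa_seq) := by unfold Pre_aa_to_list; infer_instance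

def pvWitness_aa_to_list : String := " met-LYS-ala "

def Spec_aa_to_list (aa_seq : String) (out : List String) : Prop := out = aa_to_list_alt aa_seq
instance (aa_seq : String) (out : List String) : Decidable (Spec_aa_to_list aa_seq out) := by unfold Spec_aa_to_list; infer_instance

-- ===== CLAIM =====
def Claim_equal_aa_to_list : Prop := ∀ (aa_seq : String), Dom_aa_to_list aa_seq → Pre_aa_to_list aa_seq → Spec_aa_to_list aa_seq (aa_to_list aa_seq)

-- ===== LEMMAS AND PROOFS =====

-- pure specification of splitting on '-' used to bridge A's split('-') and B's partition loop
def splitsC (cs : List Char) : List (List Char) :=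
  if (cs.dropWhile (fun c => c ≠ '-')).isEmpty then [cs.takeWhile (fun c => c ≠ '-')]
  else cs.takeWhile (fun c => c ≠ '-') :: splitsC (cs.dropWhile (fun c => c ≠ '-')).tail
termination_by cs.length
decreasing_by
  have h1 : (cs.dropWhile (fun c => decide (c ≠ '-'))).length ≤ cs.length :=
    List.length_dropWhile_le _ _
  have h2 : 0 < (cs.dropWhile (fun c => decide (c ≠ '-'))).length :=
    List.length_pos_of_ne_nil (by simpa [List.isEmpty_iff] using
      (by assumption : ¬ (cs.dropWhile (fun c => decide (c ≠ '-'))).isEmpty = true))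
  simp only [List.length_tail]
  omega

def mapHead (f : List Char → List Char) : List (List Char) → List (List Char)
  | [] => []
  | h :: t => f h :: t

lemma go_single (fuel : Nat) : ∀ (l cur : List Char) (acc : List (List Char)),
    l.length < fuel →
    PySem.Chars.splitOn.go ['-'] fuel l cur acc
      = acc.reverse ++ mapHead (fun h => cur.reverse ++ h) (splitsC l) := by
  induction fuel with
  | zero => intro l cur acc h; omega
  | succ fuel ih =>
    intro l cur acc h
    match l with
    | [] =>
      rw [splitsC.eq_def]
      simp [PySem.Chars.splitOn.go, mapHead]
    | c :: rest =>
      by_cases hc : c = '-'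
      · subst hc
        have : PySem.Chars.splitOn.go ['-'] (fuel+1) ('-' :: rest) cur acc
            = PySem.Chars.splitOn.go ['-'] fuel rest [] (cur.reverse :: acc) := by
          simp [PySem.Chars.splitOn.go, List.isPrefixOf]
        rw [this, ih rest [] (cur.reverse :: acc) (by simpa using Nat.lt_of_succ_lt_succ h)]
        rw [splitsC.eq_def ('-' :: rest)]
        have hhead : List.takeWhile (fun c => decide (c ≠ '-')) ('-' :: rest) = [] := by
          simp [List.takeWhile]
        have hdrop : List.dropWhile (fun c => decide (c ≠ '-')) ('-' :: rest) = '-' :: rest := by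
          simp [List.dropWhile]
        simp only [hhead, hdrop, List.isEmpty_cons, List.tail_cons, if_neg Bool.false_ne_true]
        cases hs : splitsC rest with
        | nil => simp [mapHead]
        | cons a t => simp [mapHead]
      · have hstep : PySem.Chars.splitOn.go ['-'] (fuel+1) (c :: rest) cur acc
            = PySem.Chars.splitOn.go ['-'] fuel rest (c :: cur) acc := by
          simp only [PySem.Chars.splitOn.go, List.isPrefixOf, Bool.and_true]
          rw [if_neg (by simpa using fun hEq => hc hEq.symm)]
        rw [hstep, ih rest (c :: cur) acc (by simpa using Nat.lt_of_succ_lt_succ h)]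
        have hhead : List.takeWhile (fun c => decide (c ≠ '-')) (c :: rest)
            = c :: List.takeWhile (fun c => decide (c ≠ '-')) rest := by
          simp [List.takeWhile, hc]
        have hdrop : List.dropWhile (fun c => decide (c ≠ '-')) (c :: rest)
            = List.dropWhile (fun c => decide (c ≠ '-')) rest := by
          simp [List.dropWhile, hc]
        rw [splitsC.eq_def (c :: rest)]
        simp only [hhead, hdrop]
        rw [splitsC.eq_def rest]
        by_cases he : (List.dropWhile (fun c => decide (c ≠ '-')) rest).isEmpty = true
        · rw [if_pos he, if_pos he]; simp [mapHead]
        · rw [if_neg he, if_neg he]; simp [mapHead]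

lemma splitOn_eq_splitsC (cs : List Char) :
    PySem.Chars.splitOn cs ['-'] = splitsC cs := by
  show PySem.Chars.splitOn.go ['-'] (cs.length + 1) cs [] [] = splitsC cs
  rw [go_single (cs.length + 1) cs [] [] (Nat.lt_succ_self _)]
  cases splitsC cs <;> simp [mapHead]

lemma pvToks_eq (S : String) :
    pvToks S = (splitsC S.toList).map String.ofList := by
  have h := PySem.Str.split?_map S "-"
  have hch : PySem.Chars.split? S.toList ("-" : String).toList
      = some (splitsC S.toList) := by
    simp [PySem.Chars.split?, splitOn_eq_splitsC]
  rw [hch] at h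
  cases hsp : PySem.Str.split? S "-" with
  | none => rw [hsp] at h; simp at h
  | some ts =>
    rw [hsp] at h
    simp only [Option.map_some, Option.some.injEq] at h
    have : ts = (splitsC S.toList).map String.ofList := by
      calc ts = (ts.map String.toList).map String.ofList := by
                simp [List.map_map, Function.comp_def]
        _ = (splitsC S.toList).map String.ofList := by rw [h]
    simp [pvToks, hsp, this]

-- A's dash-branch loop on all-valid token lists is a map
lemma loopA3_valid (ts : List String) (h : ∀ t ∈ ts, threeToOne.contains t = true) :
    ∀ acc, loopA3 acc ts = acc ++ ts.map (fun t => threeToOne.getD t "") := by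
  induction ts with
  | nil => intro acc; simp [loopA3]
  | cons t ts ih =>
    intro acc
    simp only [loopA3, h t (List.mem_cons_self ..), if_true, List.map_cons]
    rw [ih (fun x hx => h x (List.mem_cons_of_mem _ hx))]
    simp

-- the first split piece is a member of splitsC
lemma head_mem_splitsC (cs : List Char) :
    cs.takeWhile (fun c => decide (c ≠ '-')) ∈ splitsC cs := by
  rw [splitsC.eq_def]
  split <;> simp

-- B's partition loop on all-valid strings is the same map over the split pieces
lemma convCodes_eq (n : Nat) : ∀ (cs : List Char), cs.length ≤ n →
    (∀ l ∈ splitsC cs, threeToOne.contains (String.ofList l) = true) →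
    convCodes cs = (splitsC cs).map (fun l => threeToOne.getD (String.ofList l) "") := by
  induction n with
  | zero =>
    intro cs hlen h
    have : cs = [] := List.length_eq_zero_iff.mp (Nat.le_zero.mp hlen)
    subst this
    rw [convCodes.eq_def, splitsC.eq_def]
    simp [h [] (by rw [splitsC.eq_def]; simp)]
  | succ n ih =>
    intro cs hlen h
    have hcon := h _ (head_mem_splitsC cs)
    rw [convCodes.eq_def, splitsC.eq_def]
    simp only [hcon, if_true]
    by_cases he : (List.dropWhile (fun c => decide (c ≠ '-')) cs).isEmpty = true
    · rw [if_pos he, if_pos he]; simp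
    · rw [if_neg he, if_neg he]
      simp only [List.map_cons, List.cons.injEq, true_and]
      have hne : List.dropWhile (fun c => decide (c ≠ '-')) cs ≠ [] := by
        simpa [List.isEmpty_iff] using he
      have hlt : (List.dropWhile (fun c => decide (c ≠ '-')) cs).tail.length ≤ n := by
        have h1 : (List.dropWhile (fun c => decide (c ≠ '-')) cs).length ≤ cs.length :=
          List.length_dropWhile_le _ _
        have h2 : 0 < (List.dropWhile (fun c => decide (c ≠ '-')) cs).length :=
          List.length_pos_of_ne_nil hne
        simp only [List.length_tail]
        omega
      apply ih _ hlt
      intro l hl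
      apply h
      rw [splitsC.eq_def]
      simp only [he, Bool.false_eq_true, if_false]
      exact List.mem_cons_of_mem _ hl

-- A's validation loop succeeds on all-valid one-letter lists
lemma checkA1_true (l : List String) (h : ∀ s ∈ l, PySem.Set.contains setOne s = true) :
    checkA1 l = true := by
  induction l with
  | nil => rfl
  | cons s l ih =>
    simp only [checkA1, h s (List.mem_cons_self ..), if_true]
    exact ih (fun x hx => h x (List.mem_cons_of_mem _ hx))

-- ===== VERDICT =====
theorem aa_to_list_spec : Claim_equal_aa_to_list := by
  intro aa_seq _ hpre
  obtain ⟨h1, h2, h3, h4⟩ := hpre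
  unfold Spec_aa_to_list aa_to_list aa_to_list_alt
  by_cases hd : PySem.Str.isIn "-" (aaS aa_seq) = true
  · simp only [h1, h2, Bool.or_self, hd, Bool.false_eq_true, if_false, if_true]
    have hval := h3 hd
    rw [loopA3_valid _ hval [], List.nil_append, pvToks_eq, List.map_map]
    rw [convCodes_eq (aaS aa_seq).toList.length _ le_rfl]
    · rfl
    · intro l hl
      apply hval
      rw [pvToks_eq]
      exact List.mem_map.mpr ⟨l, hl, rfl⟩
  · have hd' : PySem.Str.isIn "-" (aaS aa_seq) = false := by simpa using hd
    have h4' := h4 hd'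
    have hck : checkA1 ((aaS aa_seq).toList.map (fun c => String.ofList [c])) = true := by
      refine checkA1_true _ ?_
      intro s hs
      obtain ⟨c, hc, rfl⟩ := List.mem_map.mp hs
      exact h4' c hc
    have hbad : ((aaS aa_seq).toList.filter
        (fun c => ¬ PySem.Set.contains setOne (String.ofList [c]))).isEmpty = true := by
      rw [List.isEmpty_iff, List.filter_eq_nil_iff]
      intro c hc
      simp
      exact (PySem.Set.contains_iff _ _).mp (h4' c hc)
    simp only [h1, h2, Bool.or_self, hd', hck, hbad, Bool.false_eq_true, if_false, if_true]
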